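-- pv_equiv track=rewrite | github.com/aw4630/trailblaze | Buildathon-main/iterative_itinerary_generator.py | _format_feedback_for_openai
-- ===== SOURCE A (Python) =====
-- from typing import Dict, Any, List, Optional
--
-- def _format_feedback_for_openai(verification_result: Dict[str, Any]) -> str:
--     """Format the verification results into clear instructions for OpenAI"""
--     feedback = []
--
--     # Format issue categories
--     if verification_result["details"].get("format", {}).get("issues"):
--         feedback.append("FORMAT ISSUES:")
--         for issue in verification_result["details"]["format"]["issues"]:
--             feedback.append(f"- {issue}")
--         feedback.append("Please fix the JSON format issues above first.\n")
--
--     if verification_result["details"].get("venue_hours", {}).get("issues"):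
--         feedback.append("VENUE HOURS ISSUES:")
--         for issue in verification_result["details"]["venue_hours"]["issues"]:
--             feedback.append(f"- {issue}")
--         feedback.append("Please adjust event times to occur within venue operating hours.\n")
--
--     if verification_result["details"].get("travel_times", {}).get("issues"):
--         feedback.append("TRAVEL TIME ISSUES:")
--         for issue in verification_result["details"]["travel_times"]["issues"]:
--             feedback.append(f"- {issue}")
--         feedback.append("Please allow more time between events or choose venues closer together.\n")
--
--     if verification_result["details"].get("activity_durations", {}).get("issues"):
--         feedback.append("ACTIVITY DURATION ISSUES:")
--         for issue in verification_result["details"]["activity_durations"]["issues"]: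
--             feedback.append(f"- {issue}")
--         feedback.append("Please adjust event durations to be more realistic.\n")
--
--     if verification_result["details"].get("buffer_times", {}).get("issues"):
--         feedback.append("BUFFER TIME ISSUES:")
--         for issue in verification_result["details"]["buffer_times"]["issues"]:
--             feedback.append(f"- {issue}")
--         feedback.append("Please ensure events don't overlap and have sufficient buffer times.\n")
--
--     if verification_result["details"].get("overall_timing", {}).get("issues"):
--         feedback.append("OVERALL TIMING ISSUES:")
--         for issue in verification_result["details"]["overall_timing"]["issues"]:
--             feedback.append(f"- {issue}")
--         feedback.append("Please adjust the overall timing of the itinerary.\n")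
--
--     # Add detailed schema guidance
--     feedback.append("REQUIRED SCHEMA:")
--     feedback.append("1. Each EVENT must include ALL of these fields:")
--     feedback.append("   - id: A unique identifier (e.g., 'event1', 'event2')")
--     feedback.append("   - name: Name of the event")
--     feedback.append("   - description: Description of the event")
--     feedback.append("   - start_time: ISO format date and time (e.g., '2023-08-15T19:00:00')")
--     feedback.append("   - end_time: ISO format date and time (e.g., '2023-08-15T22:00:00')")
--     feedback.append("   - venue_name: Must match EXACTLY with a venue name in the venues array")
--     feedback.append("   - cost: Numeric cost in USD (e.g., 120.00)")
--
--     feedback.append("2. Each VENUE must include ALL of these fields:")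
--     feedback.append("   - name: Name of the venue (must match venue_name in events)")
--     feedback.append("   - address: Full street address")
--     feedback.append("   - latitude: Numeric latitude coordinate (e.g., 40.7580)")
--     feedback.append("   - longitude: Numeric longitude coordinate (e.g., -73.9855)")
--     feedback.append("   - opening_hours: Hours of operation (e.g., '9:00 AM - 11:00 PM')")
--     feedback.append("   - place_id: A unique identifier (can be made up for this exercise)")
--
--     feedback.append("3. For a Broadway-themed itinerary, remember:")
--     feedback.append("   - Broadway shows typically start at 7:00 PM or 8:00 PM and last 2.5-3 hours")
--     feedback.append("   - Include pre-show dining with at least 1.5 hours before showtime")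
--     feedback.append("   - The Theater District is concentrated around Times Square")
--     feedback.append("   - Allow at least 30 minutes for travel between venues in Manhattan")
--
--     return "\n".join(feedback)
-- ===== SOURCE B (Python) =====
-- _SECTIONS = [
--     ("format", "FORMAT ISSUES:", "Please fix the JSON format issues above first.\n"),
--     ("venue_hours", "VENUE HOURS ISSUES:", "Please adjust event times to occur within venue operating hours.\n"),
--     ("travel_times", "TRAVEL TIME ISSUES:", "Please allow more time between events or choose venues closer together.\n"),
--     ("activity_durations", "ACTIVITY DURATION ISSUES:", "Please adjust event durations to be more realistic.\n"),
--     ("buffer_times", "BUFFER TIME ISSUES:", "Please ensure events don't overlap and have sufficient buffer times.\n"),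
--     ("overall_timing", "OVERALL TIMING ISSUES:", "Please adjust the overall timing of the itinerary.\n"),
-- ]
--
-- _SCHEMA_TEXT = (
--     "REQUIRED SCHEMA:\n"
--     "1. Each EVENT must include ALL of these fields:\n"
--     "   - id: A unique identifier (e.g., 'event1', 'event2')\n"
--     "   - name: Name of the event\n"
--     "   - description: Description of the event\n"
--     "   - start_time: ISO format date and time (e.g., '2023-08-15T19:00:00')\n"
--     "   - end_time: ISO format date and time (e.g., '2023-08-15T22:00:00')\n"
--     "   - venue_name: Must match EXACTLY with a venue name in the venues array\n"
--     "   - cost: Numeric cost in USD (e.g., 120.00)\n"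
--     "2. Each VENUE must include ALL of these fields:\n"
--     "   - name: Name of the venue (must match venue_name in events)\n"
--     "   - address: Full street address\n"
--     "   - latitude: Numeric latitude coordinate (e.g., 40.7580)\n"
--     "   - longitude: Numeric longitude coordinate (e.g., -73.9855)\n"
--     "   - opening_hours: Hours of operation (e.g., '9:00 AM - 11:00 PM')\n"
--     "   - place_id: A unique identifier (can be made up for this exercise)\n"
--     "3. For a Broadway-themed itinerary, remember:\n"
--     "   - Broadway shows typically start at 7:00 PM or 8:00 PM and last 2.5-3 hours\n"
--     "   - Include pre-show dining with at least 1.5 hours before showtime\n"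
--     "   - The Theater District is concentrated around Times Square\n"
--     "   - Allow at least 30 minutes for travel between venues in Manhattan"
-- )
--
--
-- def _format_feedback_for_openai(verification_result):
--     """Format the verification results into clear instructions for OpenAI"""
--     details = verification_result["details"]
--     # Build the final string directly, back to front: start from the static
--     # schema text and prepend each issue section (last category first).
--     text = _SCHEMA_TEXT
--     for key, header, footer in reversed(_SECTIONS):
--         issues = details.get(key, {}).get("issues")
--         if issues:
--             body = "\n".join(f"- {issue}" for issue in issues)
--             text = header + "\n" + body + "\n" + footer + "\n" + text
--     return text
-- ===== Notes on version B (the rewrite author's own statement) =====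
-- stated objective: alternative
-- what changed: Instead of accumulating one flat list of lines and joining it once at the end, B builds the final string directly back-to-front: it starts from the static schema text as a single literal and, iterating the category table in reverse, prepends each section (header, per-section pre-joined issue body, footer) by string concatenation.
import Mathlib
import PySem

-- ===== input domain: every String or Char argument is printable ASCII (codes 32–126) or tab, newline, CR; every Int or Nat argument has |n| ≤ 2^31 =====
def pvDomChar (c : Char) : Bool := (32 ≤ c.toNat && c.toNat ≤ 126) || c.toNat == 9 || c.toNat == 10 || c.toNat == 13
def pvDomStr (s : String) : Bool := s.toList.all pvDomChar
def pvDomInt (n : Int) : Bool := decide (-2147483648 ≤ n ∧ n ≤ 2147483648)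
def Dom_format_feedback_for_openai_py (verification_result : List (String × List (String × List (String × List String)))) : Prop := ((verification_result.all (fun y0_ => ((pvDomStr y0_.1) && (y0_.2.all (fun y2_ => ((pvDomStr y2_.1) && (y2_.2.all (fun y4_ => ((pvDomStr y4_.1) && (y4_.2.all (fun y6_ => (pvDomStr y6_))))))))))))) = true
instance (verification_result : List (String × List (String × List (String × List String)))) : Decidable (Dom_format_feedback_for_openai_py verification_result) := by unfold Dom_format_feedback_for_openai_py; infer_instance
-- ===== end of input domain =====

-- B builds the result string directly back-to-front (static schema text literal,
-- sections prepended by concatenation) instead of A's flat line list joined once;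
-- objective: alternative decomposition, same cost.

-- ===== PORT A =====
-- verification_result["details"].get(k, {}).get("issues"): direct indexing inside each
-- guarded block is ported with getD [] — the guard (nonempty issues) ensures presence,
-- so getD never supplies its default on a taken branch; Python truthiness of
-- `None`/`[]` is exactly `isEmpty` of the `getD []` value.
def pyIssues (details : List (String × List (String × List String))) (k : String) : List String :=
  ((PySem.Dict.mk (((PySem.Dict.mk details).get? k).getD [])).get? "issues").getD []

def format_feedback_for_openai_py (verification_result : List (String × List (String × List (String × List String)))) : String :=
  match (PySem.Dict.mk verification_result).get? "details" with
  | none => ""   -- Python raises KeyError here; excluded by Pre_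
  | some details =>
    let feedback : List String := []
    let i1 := pyIssues details "format"
    let feedback := if i1.isEmpty then feedback else
      (i1.foldl (fun acc issue => acc ++ ["- " ++ issue]) (feedback ++ ["FORMAT ISSUES:"]))
        ++ ["Please fix the JSON format issues above first.\n"]
    let i2 := pyIssues details "venue_hours"
    let feedback := if i2.isEmpty then feedback else
      (i2.foldl (fun acc issue => acc ++ ["- " ++ issue]) (feedback ++ ["VENUE HOURS ISSUES:"]))
        ++ ["Please adjust event times to occur within venue operating hours.\n"]
    let i3 := pyIssues details "travel_times"
    let feedback := if i3.isEmpty then feedback else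
      (i3.foldl (fun acc issue => acc ++ ["- " ++ issue]) (feedback ++ ["TRAVEL TIME ISSUES:"]))
        ++ ["Please allow more time between events or choose venues closer together.\n"]
    let i4 := pyIssues details "activity_durations"
    let feedback := if i4.isEmpty then feedback else
      (i4.foldl (fun acc issue => acc ++ ["- " ++ issue]) (feedback ++ ["ACTIVITY DURATION ISSUES:"]))
        ++ ["Please adjust event durations to be more realistic.\n"]
    let i5 := pyIssues details "buffer_times"
    let feedback := if i5.isEmpty then feedback else
      (i5.foldl (fun acc issue => acc ++ ["- " ++ issue]) (feedback ++ ["BUFFER TIME ISSUES:"]))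
        ++ ["Please ensure events don't overlap and have sufficient buffer times.\n"]
    let i6 := pyIssues details "overall_timing"
    let feedback := if i6.isEmpty then feedback else
      (i6.foldl (fun acc issue => acc ++ ["- " ++ issue]) (feedback ++ ["OVERALL TIMING ISSUES:"]))
        ++ ["Please adjust the overall timing of the itinerary.\n"]
    let feedback := feedback ++ ["REQUIRED SCHEMA:"]
    let feedback := feedback ++ ["1. Each EVENT must include ALL of these fields:"]
    let feedback := feedback ++ ["   - id: A unique identifier (e.g., 'event1', 'event2')"]
    let feedback := feedback ++ ["   - name: Name of the event"]
    let feedback := feedback ++ ["   - description: Description of the event"]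
    let feedback := feedback ++ ["   - start_time: ISO format date and time (e.g., '2023-08-15T19:00:00')"]
    let feedback := feedback ++ ["   - end_time: ISO format date and time (e.g., '2023-08-15T22:00:00')"]
    let feedback := feedback ++ ["   - venue_name: Must match EXACTLY with a venue name in the venues array"]
    let feedback := feedback ++ ["   - cost: Numeric cost in USD (e.g., 120.00)"]
    let feedback := feedback ++ ["2. Each VENUE must include ALL of these fields:"]
    let feedback := feedback ++ ["   - name: Name of the venue (must match venue_name in events)"]
    let feedback := feedback ++ ["   - address: Full street address"]
    let feedback := feedback ++ ["   - latitude: Numeric latitude coordinate (e.g., 40.7580)"]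
    let feedback := feedback ++ ["   - longitude: Numeric longitude coordinate (e.g., -73.9855)"]
    let feedback := feedback ++ ["   - opening_hours: Hours of operation (e.g., '9:00 AM - 11:00 PM')"]
    let feedback := feedback ++ ["   - place_id: A unique identifier (can be made up for this exercise)"]
    let feedback := feedback ++ ["3. For a Broadway-themed itinerary, remember:"]
    let feedback := feedback ++ ["   - Broadway shows typically start at 7:00 PM or 8:00 PM and last 2.5-3 hours"]
    let feedback := feedback ++ ["   - Include pre-show dining with at least 1.5 hours before showtime"]
    let feedback := feedback ++ ["   - The Theater District is concentrated around Times Square"]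
    let feedback := feedback ++ ["   - Allow at least 30 minutes for travel between venues in Manhattan"]
    PySem.Str.join "\n" feedback

-- ===== PORT B =====
def altSections : List (String × String × String) :=
  [ ("format", "FORMAT ISSUES:", "Please fix the JSON format issues above first.\n"),
    ("venue_hours", "VENUE HOURS ISSUES:", "Please adjust event times to occur within venue operating hours.\n"),
    ("travel_times", "TRAVEL TIME ISSUES:", "Please allow more time between events or choose venues closer together.\n"),
    ("activity_durations", "ACTIVITY DURATION ISSUES:", "Please adjust event durations to be more realistic.\n"),
    ("buffer_times", "BUFFER TIME ISSUES:", "Please ensure events don't overlap and have sufficient buffer times.\n"),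
    ("overall_timing", "OVERALL TIMING ISSUES:", "Please adjust the overall timing of the itinerary.\n") ]

def altSchemaText : String :=
  "REQUIRED SCHEMA:\n1. Each EVENT must include ALL of these fields:\n   - id: A unique identifier (e.g., 'event1', 'event2')\n   - name: Name of the event\n   - description: Description of the event\n   - start_time: ISO format date and time (e.g., '2023-08-15T19:00:00')\n   - end_time: ISO format date and time (e.g., '2023-08-15T22:00:00')\n   - venue_name: Must match EXACTLY with a venue name in the venues array\n   - cost: Numeric cost in USD (e.g., 120.00)\n2. Each VENUE must include ALL of these fields:\n   - name: Name of the venue (must match venue_name in events)\n   - address: Full street address\n   - latitude: Numeric latitude coordinate (e.g., 40.7580)\n   - longitude: Numeric longitude coordinate (e.g., -73.9855)\n   - opening_hours: Hours of operation (e.g., '9:00 AM - 11:00 PM')\n   - place_id: A unique identifier (can be made up for this exercise)\n3. For a Broadway-themed itinerary, remember:\n   - Broadway shows typically start at 7:00 PM or 8:00 PM and last 2.5-3 hours\n   - Include pre-show dining with at least 1.5 hours before showtime\n   - The Theater District is concentrated around Times Square\n   - Allow at least 30 minutes for travel between venues in Manhattan"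

-- Source B's reversed loop that prepends onto `text` is the right fold over the table.
def format_feedback_for_openai_py_alt (verification_result : List (String × List (String × List (String × List String)))) : String :=
  match (PySem.Dict.mk verification_result).get? "details" with
  | none => ""   -- Python raises KeyError here; excluded by Pre_
  | some details =>
    altSections.foldr (fun e text =>
      let issues := pyIssues details e.1
      if issues.isEmpty then text
      else e.2.1 ++ "\n" ++ PySem.Str.join "\n" (issues.map (fun issue => "- " ++ issue))
             ++ "\n" ++ e.2.2 ++ "\n" ++ text)
      altSchemaText

-- ===== PRECONDITION & SPEC =====
-- Pre_ excludes exactly the inputs with no top-level "details" key, where Python A raises KeyError.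
def Pre_format_feedback_for_openai_py (verification_result : List (String × List (String × List (String × List String)))) : Prop :=
  "details" ∈ verification_result.map Prod.fst
instance (verification_result : List (String × List (String × List (String × List String)))) : Decidable (Pre_format_feedback_for_openai_py verification_result) := by unfold Pre_format_feedback_for_openai_py; infer_instance

def pvWitness_format_feedback_for_openai_py : (List (String × List (String × List (String × List String)))) :=
  [("details", [("format", [("issues", ["bad json"])])])]

def Spec_format_feedback_for_openai_py (verification_result : List (String × List (String × List (String × List String)))) (out : String) : Prop := out = format_feedback_for_openai_py_alt verification_result
instance (verification_result : List (String × List (String × List (String × List String)))) (out : String) : Decidable (Spec_format_feedback_for_openai_py verification_result out) := by unfold Spec_format_feedback_for_openai_py; infer_instance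

-- ===== CLAIM =====
def Claim_equal_format_feedback_for_openai_py : Prop := ∀ (verification_result : List (String × List (String × List (String × List String)))), Dom_format_feedback_for_openai_py verification_result → Pre_format_feedback_for_openai_py verification_result → Spec_format_feedback_for_openai_py verification_result (format_feedback_for_openai_py verification_result)

-- ===== LEMMAS AND PROOFS =====

theorem join_cons_ne (x : String) (xs : List String) (h : xs ≠ []) :
    PySem.Str.join "\n" (x :: xs) = x ++ "\n" ++ PySem.Str.join "\n" xs := by
  cases xs with
  | nil => exact absurd rfl h
  | cons y ys =>
    apply String.toList_inj.mp
    simp [PySem.Str.join, PySem.Chars.join_cons_cons]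

theorem join_singleton' (x : String) : PySem.Str.join "\n" [x] = x := by
  simp [PySem.Str.join, PySem.Chars.join_singleton]

theorem join_append_ne (xs ys : List String) (hx : xs ≠ []) (hy : ys ≠ []) :
    PySem.Str.join "\n" (xs ++ ys) = PySem.Str.join "\n" xs ++ "\n" ++ PySem.Str.join "\n" ys := by
  induction xs with
  | nil => exact absurd rfl hx
  | cons x xs ih =>
    cases xs with
    | nil =>
      rw [List.singleton_append, join_cons_ne _ _ hy, join_singleton']
    | cons y zs =>
      rw [List.cons_append, join_cons_ne _ _ (by simp), ih (by simp),
          join_cons_ne x (y :: zs) (by simp)]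
      simp [String.append_assoc]

-- A's static tail, as the line list (used only by the proofs)
abbrev schemaLines : List String :=
  [ "REQUIRED SCHEMA:",
    "1. Each EVENT must include ALL of these fields:",
    "   - id: A unique identifier (e.g., 'event1', 'event2')",
    "   - name: Name of the event",
    "   - description: Description of the event",
    "   - start_time: ISO format date and time (e.g., '2023-08-15T19:00:00')",
    "   - end_time: ISO format date and time (e.g., '2023-08-15T22:00:00')",
    "   - venue_name: Must match EXACTLY with a venue name in the venues array",
    "   - cost: Numeric cost in USD (e.g., 120.00)",
    "2. Each VENUE must include ALL of these fields:",
    "   - name: Name of the venue (must match venue_name in events)",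
    "   - address: Full street address",
    "   - latitude: Numeric latitude coordinate (e.g., 40.7580)",
    "   - longitude: Numeric longitude coordinate (e.g., -73.9855)",
    "   - opening_hours: Hours of operation (e.g., '9:00 AM - 11:00 PM')",
    "   - place_id: A unique identifier (can be made up for this exercise)",
    "3. For a Broadway-themed itinerary, remember:",
    "   - Broadway shows typically start at 7:00 PM or 8:00 PM and last 2.5-3 hours",
    "   - Include pre-show dining with at least 1.5 hours before showtime",
    "   - The Theater District is concentrated around Times Square",
    "   - Allow at least 30 minutes for travel between venues in Manhattan" ]

-- the list of lines one A-section contributes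
def seg (i : List String) (h t : String) : List String :=
  if i.isEmpty then [] else h :: (i.map (fun s => "- " ++ s) ++ [t])

theorem join_seg (i : List String) (h t : String) (rest : List String) (hr : rest ≠ []) :
    PySem.Str.join "\n" (seg i h t ++ rest)
      = if i.isEmpty then PySem.Str.join "\n" rest
        else h ++ "\n" ++ PySem.Str.join "\n" (i.map (fun s => "- " ++ s)) ++ "\n" ++ t ++ "\n"
               ++ PySem.Str.join "\n" rest := by
  unfold seg
  split_ifs with hi
  · simp
  · have hmap : i.map (fun s => "- " ++ s) ≠ [] := by
      simpa [List.isEmpty_iff] using hi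
    rw [List.cons_append, join_cons_ne _ _ (by simp),
        List.append_assoc, join_append_ne _ ([t] ++ rest) hmap (by simp),
        List.singleton_append, join_cons_ne t rest hr]
    simp [String.append_assoc]

theorem if_seg (i : List String) (h t : String) (fb : List String) :
    (if i.isEmpty then fb else (i.foldl (fun acc issue => acc ++ ["- " ++ issue]) (fb ++ [h])) ++ [t])
      = fb ++ seg i h t := by
  unfold seg
  split_ifs with hi
  · simp
  · rw [PySem.List.foldl_append_singleton_eq_map]
    simp

set_option maxRecDepth 16384 in
set_option maxHeartbeats 1000000 in
theorem schema_join : PySem.Str.join "\n" schemaLines = altSchemaText := by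
  simp only [schemaLines]
  rw [join_cons_ne _ _ (by simp)]
  rw [join_cons_ne _ _ (by simp)]
  rw [join_cons_ne _ _ (by simp)]
  rw [join_cons_ne _ _ (by simp)]
  rw [join_cons_ne _ _ (by simp)]
  rw [join_cons_ne _ _ (by simp)]
  rw [join_cons_ne _ _ (by simp)]
  rw [join_cons_ne _ _ (by simp)]
  rw [join_cons_ne _ _ (by simp)]
  rw [join_cons_ne _ _ (by simp)]
  rw [join_cons_ne _ _ (by simp)]
  rw [join_cons_ne _ _ (by simp)]
  rw [join_cons_ne _ _ (by simp)]
  rw [join_cons_ne _ _ (by simp)]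
  rw [join_cons_ne _ _ (by simp)]
  rw [join_cons_ne _ _ (by simp)]
  rw [join_cons_ne _ _ (by simp)]
  rw [join_cons_ne _ _ (by simp)]
  rw [join_cons_ne _ _ (by simp)]
  rw [join_cons_ne _ _ (by simp)]
  rw [join_singleton']
  rfl

-- ===== VERDICT =====
theorem format_feedback_for_openai_py_spec : Claim_equal_format_feedback_for_openai_py := by
  intro vr _ _
  unfold Spec_format_feedback_for_openai_py format_feedback_for_openai_py format_feedback_for_openai_py_alt
  cases h : (PySem.Dict.mk vr).get? "details" with
  | none => rfl
  | some details =>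
    simp only [if_seg]
    simp only [List.append_assoc, List.nil_append, List.cons_append]
    rw [join_seg _ _ _ _ (by simp), join_seg _ _ _ _ (by simp), join_seg _ _ _ _ (by simp),
        join_seg _ _ _ _ (by simp), join_seg _ _ _ _ (by simp), join_seg _ _ _ _ (by simp),
        schema_join]
    simp only [altSections, List.foldr]
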